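-- pv_equiv track=rewrite | github.com/ugurrates/CABTA | src/analyzers/pdf_analyzer.py | _extract_javascript
-- ===== SOURCE A (Python) =====
-- from typing import Dict, List
--
-- def _extract_javascript(output: str) -> List[Dict]:
--     """Extract JavaScript code from pdf-parser output."""
--     scripts = []
--
--     current_obj = None
--     js_content = []
--
--     for line in output.split('\n'):
--         if line.startswith('obj ') or line.startswith('Object '):
--             if current_obj and js_content:
--                 scripts.append({
--                     'object': current_obj,
--                     'code': '\n'.join(js_content)[:1000]
--                 })
--             parts = line.split()
--             current_obj = parts[1] if len(parts) > 1 else 'unknown'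
--             js_content = []
--         elif current_obj:
--             js_content.append(line)
--
--     if current_obj and js_content:
--         scripts.append({
--             'object': current_obj,
--             'code': '\n'.join(js_content)[:1000]
--         })
--
--     return scripts
-- ===== SOURCE B (Python) =====
-- from typing import Dict, List
--
--
-- def _object_name(line: str) -> str:
--     parts = line.split()
--     return parts[1] if len(parts) > 1 else 'unknown'
--
--
-- def _extract_javascript(output: str) -> List[Dict]:
--     """Extract JavaScript code from pdf-parser output (index/slice decomposition)."""
--     lines = output.split('\n')
--     # positions of the header lines
--     headers = [i for i, line in enumerate(lines)
--                if line.startswith('obj ') or line.startswith('Object ')]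
--     # each object's content is the slice between its header and the next one
--     return [{'object': _object_name(lines[h]),
--              'code': '\n'.join(lines[h + 1:end])[:1000]}
--             for h, end in zip(headers, headers[1:] + [len(lines)])
--             if lines[h + 1:end]]
-- ===== Notes on version B (the rewrite author's own statement) =====
-- stated objective: alternative
-- what changed: Replaced A's stateful emit-at-boundary line scan (current object + pending content list + flush at each header and at EOF) with an index-based formulation: compute the list of header line indices, pair each with the next header index (or the line count) via zip, and render each object directly from the slice lines[h+1:end].
import Mathlib
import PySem

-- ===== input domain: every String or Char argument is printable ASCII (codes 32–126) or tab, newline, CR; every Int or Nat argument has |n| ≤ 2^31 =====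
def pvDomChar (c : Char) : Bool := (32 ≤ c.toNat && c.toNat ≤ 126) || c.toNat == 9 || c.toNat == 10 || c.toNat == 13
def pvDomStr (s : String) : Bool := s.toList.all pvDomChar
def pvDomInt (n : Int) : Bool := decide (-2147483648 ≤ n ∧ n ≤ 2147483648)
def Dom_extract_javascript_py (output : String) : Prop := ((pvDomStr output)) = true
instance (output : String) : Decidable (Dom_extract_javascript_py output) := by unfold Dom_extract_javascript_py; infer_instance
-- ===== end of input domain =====

-- B replaces A's stateful emit-at-boundary scan by an index-based formulation:
-- header positions, zipped with the next header position, then direct slicing (objective: alternative).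

-- ===== PORT A =====
-- Python truthiness of Optional[str]: None and '' are falsy.
def pvTruthyOptStr (o : Option String) : Bool :=
  match o with
  | none => false
  | some s => decide (s ≠ "")

-- the dict literal {'object': …, 'code': '\n'.join(js)[:1000]}
def pvEntry (name : String) (js : List String) : List (String × String) :=
  [("object", name), ("code", PySem.Str.slice (PySem.Str.join "\n" js) none (some 1000))]

-- line.startswith('obj ') or line.startswith('Object ')  (the header test, shared by both sources)
def pvIsHeader (line : String) : Bool :=
  PySem.Str.startswith line "obj " || PySem.Str.startswith line "Object "

-- parts[1] if len(parts) > 1 else 'unknown'   (A inlines this; Source B's helper _object_name)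
def pvObjName (line : String) : String :=
  match PySem.Str.split₀ line with
  | _ :: p :: _ => p
  | _ => "unknown"

-- one iteration of A's for-loop over (scripts, current_obj, js_content)
def pvAStep (st : List (List (String × String)) × Option String × List String) (line : String) :
    List (List (String × String)) × Option String × List String :=
  let (scripts, cur, js) := st
  if pvIsHeader line then
    let scripts' := if pvTruthyOptStr cur && !js.isEmpty then scripts ++ [pvEntry (cur.getD "") js] else scripts
    (scripts', some (pvObjName line), [])
  else if pvTruthyOptStr cur then (scripts, cur, js ++ [line])
  else (scripts, cur, js)

def extract_javascript_py (output : String) : List (List (String × String)) :=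
  let lines := (PySem.Str.split? output "\n").getD []   -- '\n' ≠ "", so split? is always `some`
  let (scripts, cur, js) := lines.foldl pvAStep ([], none, [])
  if pvTruthyOptStr cur && !js.isEmpty then scripts ++ [pvEntry (cur.getD "") js] else scripts

-- ===== PORT B =====
def extract_javascript_py_alt (output : String) : List (List (String × String)) :=
  let lines := (PySem.Str.split? output "\n").getD []
  -- headers = [i for i, line in enumerate(lines) if line.startswith('obj ') or line.startswith('Object ')]
  let headers := ((PySem.List.enumerate lines).filter (fun p => pvIsHeader p.2)).map Prod.fst
  -- [{'object': _object_name(lines[h]), 'code': '\n'.join(lines[h+1:end])[:1000]}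
  --  for h, end in zip(headers, headers[1:] + [len(lines)]) if lines[h+1:end]]
  ((headers.zip (headers.drop 1 ++ [(lines.length : Int)])).filter
      (fun p => !(PySem.List.slice lines (some (p.1 + 1)) (some p.2)).isEmpty)).map
    (fun p => pvEntry (pvObjName (PySem.List.pyGetD lines p.1 ""))
      (PySem.List.slice lines (some (p.1 + 1)) (some p.2)))

-- ===== PRECONDITION & SPEC =====
def Spec_extract_javascript_py (output : String) (out : List (List (String × String))) : Prop := out = extract_javascript_py_alt output
instance (output : String) (out : List (List (String × String))) : Decidable (Spec_extract_javascript_py output out) := by unfold Spec_extract_javascript_py; infer_instance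

-- ===== CLAIM (what is proved, stated in full; the proofs are below) =====
def Claim_equal_extract_javascript_py : Prop := ∀ (output : String), Dom_extract_javascript_py output → Spec_extract_javascript_py output (extract_javascript_py output)

-- ===== LEMMAS AND PROOFS =====

-- shared abbreviations for the proofs
def pvNotHdr (x : String) : Bool := !pvIsHeader x

-- the blocks of the output, characterised recursively: each header opens a block whose
-- content is the run of non-header lines after it
def pvRec : List String -> List (String × List String)
  | [] => []
  | l :: rest =>
    if pvIsHeader l then
      (pvObjName l, rest.takeWhile pvNotHdr) :: pvRec (rest.dropWhile pvNotHdr)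
    else pvRec rest
termination_by xs => xs.length
decreasing_by
  · exact Nat.lt_succ_of_le (List.length_dropWhile_le _ _)
  · exact Nat.lt_succ_self _

def pvRender (bs : List (String × List String)) : List (List (String × String)) :=
  (bs.filter (fun b => !b.2.isEmpty)).map (fun b => pvEntry b.1 b.2)

def pvFinish (st : List (List (String × String)) × Option String × List String) :
    List (List (String × String)) :=
  let (scripts, cur, js) := st
  if pvTruthyOptStr cur && !js.isEmpty then scripts ++ [pvEntry (cur.getD "") js] else scripts

def pvHIdxFrom (s : Int) (xs : List String) : List Int :=
  ((PySem.List.enumerate xs s).filter (fun p => pvIsHeader p.2)).map Prod.fst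

def pvPairs (xs : List String) : List (Int × Int) :=
  (pvHIdxFrom 0 xs).zip ((pvHIdxFrom 0 xs).drop 1 ++ [(xs.length : Int)])

def pvBlockOf (xs : List String) (p : Int × Int) : String × List String :=
  (pvObjName (PySem.List.pyGetD xs p.1 ""), PySem.List.slice xs (some (p.1 + 1)) (some p.2))

-- every token of Python's str.split() is non-empty
lemma split0_go_ne_nil (s cur : List Char) (acc : List (List Char))
    (hacc : ∀ t ∈ acc, t ≠ []) : ∀ t ∈ PySem.Chars.split₀.go s cur acc, t ≠ [] := by
  induction s generalizing cur acc with
  | nil =>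
    intro t ht
    unfold PySem.Chars.split₀.go at ht
    split_ifs at ht with h
    · exact hacc _ (List.mem_reverse.mp ht)
    · rw [List.mem_reverse] at ht
      rcases List.mem_cons.mp ht with rfl | h'
      · simp only [List.isEmpty_iff] at h
        simpa using h
      · exact hacc _ h'
  | cons c rest ih =>
    intro t ht
    unfold PySem.Chars.split₀.go at ht
    split_ifs at ht with h1 h2
    · exact ih [] acc hacc t ht
    · refine ih [] (cur.reverse :: acc) ?_ t ht
      intro u hu
      rcases List.mem_cons.mp hu with rfl | hu
      · simp only [List.isEmpty_iff] at h2
        simpa using h2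
      · exact hacc u hu
    · exact ih (c :: cur) acc hacc t ht

lemma split0_mem_ne_nil (line : String) : ∀ p ∈ PySem.Str.split₀ line, p ≠ "" := by
  intro p hp
  simp only [PySem.Str.split₀, List.mem_map] at hp
  obtain ⟨t, ht, rfl⟩ := hp
  have hne : t ≠ [] := split0_go_ne_nil line.toList [] [] (by simp) t ht
  intro h
  apply hne
  have : (String.ofList t).toList = t := by simp
  rw [h] at this
  simpa using this.symm

lemma pvObjName_ne_empty (line : String) : pvObjName line ≠ "" := by
  unfold pvObjName
  cases h : PySem.Str.split₀ line with
  | nil => simp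
  | cons a tl =>
    cases tl with
    | nil => simp
    | cons p tl' =>
      have := split0_mem_ne_nil line p (by simp [h])
      simpa using this

lemma pvRender_cons (b : String × List String) (bs : List (String × List String)) :
    pvRender (b :: bs) = (if !b.2.isEmpty then [pvEntry b.1 b.2] else []) ++ pvRender bs := by
  unfold pvRender
  by_cases h : b.2.isEmpty <;> simp [h]

-- ===== A-side: the fold computes pvRender (pvRec lines) =====

lemma pvA_aux (lines : List String) (scripts : List (List (String × String)))
    (c : String) (js : List String) (hc : c ≠ "") :
    pvFinish (lines.foldl pvAStep (scripts, some c, js)) =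
      scripts ++ pvRender ((c, js ++ lines.takeWhile pvNotHdr) ::
        pvRec (lines.dropWhile pvNotHdr)) := by
  induction lines generalizing scripts c js with
  | nil =>
    simp only [List.foldl_nil, List.takeWhile_nil, List.dropWhile_nil, List.append_nil]
    rw [pvRender_cons]
    by_cases hj : js.isEmpty <;>
      simp [pvFinish, pvTruthyOptStr, hc, hj, pvRec, pvRender]
  | cons l rest ih =>
    by_cases hh : pvIsHeader l
    · have hstep : pvAStep (scripts, some c, js) l =
        ((if pvTruthyOptStr (some c) && !js.isEmpty then
            scripts ++ [pvEntry c js] else scripts), some (pvObjName l), []) := by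
        simp [pvAStep, hh]
      rw [List.foldl_cons, hstep, ih _ _ _ (pvObjName_ne_empty l)]
      have ht : (l :: rest).takeWhile pvNotHdr = [] := by
        simp [pvNotHdr, hh]
      have hd : (l :: rest).dropWhile pvNotHdr = l :: rest := by
        simp [pvNotHdr, hh]
      rw [ht, hd]
      have hrec : pvRec (l :: rest) =
          (pvObjName l, rest.takeWhile pvNotHdr) :: pvRec (rest.dropWhile pvNotHdr) := by
        simp [pvRec, hh]
      rw [hrec]
      simp only [List.append_nil]
      rw [pvRender_cons (c, js)
        ((pvObjName l, rest.takeWhile pvNotHdr) :: pvRec (rest.dropWhile pvNotHdr))]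
      by_cases hj : js.isEmpty <;>
        simp [pvTruthyOptStr, hc, hj, List.append_assoc]
    · have hstep : pvAStep (scripts, some c, js) l = (scripts, some c, js ++ [l]) := by
        simp [pvAStep, hh, pvTruthyOptStr, hc]
      rw [List.foldl_cons, hstep, ih _ _ _ hc]
      have ht : (l :: rest).takeWhile pvNotHdr = l :: rest.takeWhile pvNotHdr := by
        simp [pvNotHdr, hh]
      have hd : (l :: rest).dropWhile pvNotHdr = rest.dropWhile pvNotHdr := by
        simp [pvNotHdr, hh]
      rw [ht, hd, List.append_assoc]
      rfl

lemma pvA_main (lines : List String) (scripts : List (List (String × String))) :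
    pvFinish (lines.foldl pvAStep (scripts, none, [])) = scripts ++ pvRender (pvRec lines) := by
  induction lines generalizing scripts with
  | nil => simp [pvFinish, pvTruthyOptStr, pvRec, pvRender]
  | cons l rest ih =>
    by_cases hh : pvIsHeader l
    · have hstep : pvAStep (scripts, none, []) l = (scripts, some (pvObjName l), []) := by
        simp [pvAStep, hh, pvTruthyOptStr]
      rw [List.foldl_cons, hstep, pvA_aux _ _ _ _ (pvObjName_ne_empty l)]
      have hrec : pvRec (l :: rest) =
          (pvObjName l, rest.takeWhile pvNotHdr) :: pvRec (rest.dropWhile pvNotHdr) := by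
        simp [pvRec, hh]
      rw [hrec]
      simp
    · have hstep : pvAStep (scripts, none, []) l = (scripts, none, []) := by
        simp [pvAStep, hh, pvTruthyOptStr]
      rw [List.foldl_cons, hstep, ih]
      have hrec : pvRec (l :: rest) = pvRec rest := by
        simp [pvRec, hh]
      rw [hrec]

lemma pvA_eq (lines : List String) :
    (match lines.foldl pvAStep ([], none, []) with
      | (scripts, cur, js) =>
        if pvTruthyOptStr cur && !js.isEmpty then scripts ++ [pvEntry (cur.getD "") js]
        else scripts) = pvRender (pvRec lines) := by
  have := pvA_main lines []
  rcases h : lines.foldl pvAStep ([], none, []) with ⟨s, c, j⟩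
  rw [h] at this
  simpa [pvFinish] using this

-- ===== B-side: the header indices / zip / slice pipeline computes the same blocks =====

lemma pvHIdxFrom_cons (s : Int) (l : String) (xs : List String) :
    pvHIdxFrom s (l :: xs) =
      (if pvIsHeader l then [s] else []) ++ pvHIdxFrom (s + 1) xs := by
  by_cases hh : pvIsHeader l <;>
    simp [pvHIdxFrom, PySem.List.enumerate_cons, hh]

lemma pvHIdxFrom_shift (xs : List String) (s : Int) :
    pvHIdxFrom s xs = (pvHIdxFrom 0 xs).map (· + s) := by
  induction xs generalizing s with
  | nil => simp [pvHIdxFrom]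
  | cons l rest ih =>
    rw [pvHIdxFrom_cons, pvHIdxFrom_cons]
    simp only [zero_add]
    rw [ih (s + 1), ih 1, List.map_append, List.map_map]
    congr 1
    · by_cases hh : pvIsHeader l <;> simp [hh]
    · apply List.map_congr_left
      intro i _
      simp
      ring

lemma pvHIdx_nonneg (xs : List String) : ∀ i ∈ pvHIdxFrom 0 xs, 0 ≤ i := by
  intro i hi
  simp only [pvHIdxFrom, List.mem_map, List.mem_filter] at hi
  obtain ⟨p, ⟨hp, _⟩, rfl⟩ := hi
  rw [PySem.List.mem_enumerate_iff] at hp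
  obtain ⟨k, _, rfl⟩ := hp
  simp

lemma pvHIdx_nil_all (xs : List String) (h : pvHIdxFrom 0 xs = []) :
    ∀ x ∈ xs, pvNotHdr x = true := by
  induction xs with
  | nil => simp
  | cons l rest ih =>
    rw [pvHIdxFrom_cons] at h
    simp only [zero_add] at h
    rw [pvHIdxFrom_shift rest 1] at h
    by_cases hh : pvIsHeader l
    · simp [hh] at h
    · intro x hx
      rcases List.mem_cons.mp hx with rfl | hx
      · simp [pvNotHdr, hh]
      · exact ih (by simpa [hh] using h) x hx

lemma pvHIdx_head_take (xs : List String) (h : Int) (t : List Int)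
    (hx : pvHIdxFrom 0 xs = h :: t) :
    xs.take h.toNat = xs.takeWhile pvNotHdr := by
  induction xs generalizing h t with
  | nil => simp [pvHIdxFrom] at hx
  | cons l rest ih =>
    rw [pvHIdxFrom_cons] at hx
    simp only [zero_add] at hx
    rw [pvHIdxFrom_shift rest 1] at hx
    by_cases hh : pvIsHeader l
    · simp only [hh, if_pos] at hx
      have : h = 0 := by
        have := hx
        simp at this
        omega
      subst this
      simp [pvNotHdr, hh]
    · simp only [hh, Bool.false_eq_true, if_false, List.nil_append] at hx
      cases hrest : pvHIdxFrom 0 rest with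
      | nil => rw [hrest] at hx; simp at hx
      | cons h' t' =>
        rw [hrest] at hx
        simp only [List.map_cons, List.cons.injEq] at hx
        obtain ⟨rfl, _⟩ := hx
        have hnn : 0 ≤ h' := pvHIdx_nonneg rest h' (by simp [hrest])
        have htn : (h' + 1).toNat = h'.toNat + 1 := by omega
        rw [htn, List.take_succ_cons, List.takeWhile_cons,
          show pvNotHdr l = true by simp [pvNotHdr, hh], ih h' t' hrest]
        simp

lemma pvRec_dropWhile (xs : List String) :
    pvRec xs = pvRec (xs.dropWhile pvNotHdr) := by
  induction xs with
  | nil => simp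
  | cons l rest ih =>
    by_cases hh : pvIsHeader l
    · rw [List.dropWhile_cons]
      simp [pvNotHdr, hh]
    · have h1 : pvRec (l :: rest) = pvRec rest := by simp [pvRec, hh]
      rw [h1, List.dropWhile_cons]
      simp only [pvNotHdr, hh, Bool.not_false, if_pos]
      exact ih

lemma pvPairs_mem_nonneg (xs : List String) (p : Int × Int) (hp : p ∈ pvPairs xs) :
    0 ≤ p.1 ∧ 0 ≤ p.2 := by
  rcases p with ⟨a, b⟩
  obtain ⟨h1, h2⟩ := List.of_mem_zip hp
  constructor
  · exact pvHIdx_nonneg xs a h1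
  · rcases List.mem_append.mp h2 with h | h
    · exact pvHIdx_nonneg xs b (List.mem_of_mem_drop h)
    · simp only [List.mem_singleton] at h
      subst h
      positivity

lemma pvBlockOf_shift (l : String) (rest : List String) (p : Int × Int)
    (h1 : 0 ≤ p.1) (h2 : 0 ≤ p.2) :
    pvBlockOf (l :: rest) (p.1 + 1, p.2 + 1) = pvBlockOf rest p := by
  rcases p with ⟨a, b⟩
  simp only at h1 h2
  obtain ⟨n, rfl⟩ : ∃ n : Nat, a = (n : Int) := ⟨a.toNat, (Int.toNat_of_nonneg h1).symm⟩
  obtain ⟨m, rfl⟩ : ∃ m : Nat, b = (m : Int) := ⟨b.toNat, (Int.toNat_of_nonneg h2).symm⟩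
  unfold pvBlockOf
  simp only
  have c1 : (n : Int) + 1 = ((n + 1 : Nat) : Int) := by push_cast; ring
  have c2 : (n : Int) + 1 + 1 = ((n + 2 : Nat) : Int) := by push_cast; ring
  have c3 : (m : Int) + 1 = ((m + 1 : Nat) : Int) := by push_cast; ring
  rw [c2, c1, c3, PySem.List.slice_natCast, PySem.List.slice_natCast,
    PySem.List.pyGetD_natCast, PySem.List.pyGetD_natCast]
  refine congrArg₂ Prod.mk (congrArg pvObjName ?_) ?_
  · simp [List.getD]
  · have : m + 1 - (n + 2) = m - (n + 1) := by omega
    rw [this]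
    simp

lemma pvZipShift (hs : List Int) (l : String) (rest : List String) :
    (hs.map (fun x => x + 1)).zip ((hs.drop 1).map (fun x => x + 1) ++ [((l :: rest).length : Int)]) =
      (hs.zip (hs.drop 1 ++ [(rest.length : Int)])).map (fun p => (p.1 + 1, p.2 + 1)) := by
  have hlen : ((l :: rest).length : Int) = (rest.length : Int) + 1 := by simp
  rw [hlen,
    show [(rest.length : Int) + 1] = List.map (fun x : Int => x + 1) [(rest.length : Int)] from rfl,
    ← List.map_append, List.zip_map]
  apply List.map_congr_left
  intro p _
  rcases p with ⟨a, b⟩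
  rfl

lemma pvPairs_cons_nothdr (l : String) (rest : List String) (hh : ¬ pvIsHeader l = true) :
    pvPairs (l :: rest) = (pvPairs rest).map (fun p => (p.1 + 1, p.2 + 1)) := by
  unfold pvPairs
  rw [pvHIdxFrom_cons]
  simp only [zero_add]
  rw [pvHIdxFrom_shift rest 1]
  simp only [hh, if_false, Bool.false_eq_true, List.nil_append]
  rw [← List.map_drop]
  exact pvZipShift (pvHIdxFrom 0 rest) l rest

lemma pvPairs_cons_hdr (l : String) (rest : List String) (hh : pvIsHeader l = true) :
    pvPairs (l :: rest) =
      (0, ((pvHIdxFrom 0 rest).map (fun x => x + 1) ++ [((l :: rest).length : Int)]).headD 0) ::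
        (pvPairs rest).map (fun p => (p.1 + 1, p.2 + 1)) := by
  unfold pvPairs
  rw [pvHIdxFrom_cons]
  simp only [zero_add]
  rw [pvHIdxFrom_shift rest 1]
  simp only [hh, if_pos, List.singleton_append]
  cases hrest : pvHIdxFrom 0 rest with
  | nil => simp [List.zip_nil_right]
  | cons h' t' =>
    simp only [List.map_cons, List.cons_append, List.drop_succ_cons, List.drop_zero,
      List.headD_cons, List.zip_cons_cons]
    congr 1
    have := pvZipShift (h' :: t') l rest
    simpa using this

lemma pvShift_map (l : String) (rest : List String) :
    ((pvPairs rest).map (fun p => (p.1 + 1, p.2 + 1))).map (pvBlockOf (l :: rest)) =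
      (pvPairs rest).map (pvBlockOf rest) := by
  rw [List.map_map]
  apply List.map_congr_left
  intro p hp
  obtain ⟨h1, h2⟩ := pvPairs_mem_nonneg rest p hp
  simpa using pvBlockOf_shift l rest p h1 h2

lemma pvB_main (xs : List String) :
    (pvPairs xs).map (pvBlockOf xs) = pvRec xs := by
  induction xs with
  | nil => simp [pvPairs, pvHIdxFrom, pvRec]
  | cons l rest ih =>
    by_cases hh : pvIsHeader l
    · rw [pvPairs_cons_hdr l rest hh, List.map_cons, pvShift_map, ih]
      have hrec : pvRec (l :: rest) =
          (pvObjName l, rest.takeWhile pvNotHdr) :: pvRec (rest.dropWhile pvNotHdr) := by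
        simp [pvRec, hh]
      rw [hrec]
      congr 1
      · -- the head block
        cases hrest : pvHIdxFrom 0 rest with
        | nil =>
          simp only [List.map_nil, List.nil_append, List.headD_cons]
          unfold pvBlockOf
          have hn : PySem.List.pyGetD (l :: rest) (0 : Int) "" = l := by
            simp [PySem.List.pyGetD_zero_cons]
          rw [hn]
          congr 1
          have c1 : (0 : Int) + 1 = ((1 : Nat) : Int) := by norm_num
          have hlen : ((l :: rest).length : Int) = (((rest.length + 1 : Nat)) : Int) := by
            simp
          rw [c1, hlen, PySem.List.slice_natCast]
          simp only [List.drop_succ_cons, List.drop_zero]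
          have : rest.length + 1 - 1 = rest.length := by omega
          rw [this, List.take_length]
          exact ((List.takeWhile_eq_self_iff ..).mpr (pvHIdx_nil_all rest hrest)).symm
        | cons h' t' =>
          simp only [List.map_cons, List.cons_append, List.headD_cons]
          unfold pvBlockOf
          have hn : PySem.List.pyGetD (l :: rest) (0 : Int) "" = l := by
            simp [PySem.List.pyGetD_zero_cons]
          rw [hn]
          congr 1
          have hnn : 0 ≤ h' := pvHIdx_nonneg rest h' (by simp [hrest])
          obtain ⟨k, rfl⟩ : ∃ k : Nat, h' = (k : Int) := ⟨h'.toNat, (Int.toNat_of_nonneg hnn).symm⟩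
          have c1 : (0 : Int) + 1 = ((1 : Nat) : Int) := by norm_num
          have c2 : (k : Int) + 1 = ((k + 1 : Nat) : Int) := by push_cast; ring
          rw [c1, c2, PySem.List.slice_natCast]
          simp only [List.drop_succ_cons, List.drop_zero]
          have : k + 1 - 1 = k := by omega
          rw [this]
          have := pvHIdx_head_take rest (k : Int) t' hrest
          simpa using this
      · -- the tail
        exact pvRec_dropWhile rest
    · rw [pvPairs_cons_nothdr l rest hh, pvShift_map, ih]
      simp [pvRec, hh]

lemma pvB_eq (lines : List String) :
    ((((pvHIdxFrom 0 lines).zip ((pvHIdxFrom 0 lines).drop 1 ++ [(lines.length : Int)])).filter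
        (fun p => !(PySem.List.slice lines (some (p.1 + 1)) (some p.2)).isEmpty)).map
      (fun p => pvEntry (pvObjName (PySem.List.pyGetD lines p.1 ""))
        (PySem.List.slice lines (some (p.1 + 1)) (some p.2)))) =
      pvRender (pvRec lines) := by
  rw [← pvB_main lines]
  unfold pvRender
  rw [List.filter_map, List.map_map]
  rfl

-- ===== VERDICT (by name: the statement is the Claim_ definition above) =====
theorem extract_javascript_py_spec : Claim_equal_extract_javascript_py := by
  intro output _
  unfold Spec_extract_javascript_py extract_javascript_py extract_javascript_py_alt
  rw [pvA_eq, ← pvB_eq]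
  rfl
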